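-- pv_equiv track=rewrite | github.com/TsaiZinan/Investment-Review-AI-Committee | scripts/generate_daily_summary.py | find_table_after_heading
-- ===== SOURCE A (Python) =====
-- from typing import Dict, List, Optional, Tuple, Set
--
-- def parse_markdown_table(table_lines: List[str]) -> List[List[str]]:
--     rows = []
--     for line in table_lines:
--         if not line.strip().startswith('|'): continue
--         parts = [c.strip() for c in line.strip().strip('|').split('|')]
--         if len(parts) <= 1: continue
--         rows.append(parts)
--     return rows
--
-- def find_table_after_heading(text: str, heading_substring: str) -> Tuple[Optional[List[List[str]]], str]:
--     lines = text.splitlines()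
--     start_idx = None
--     for i, ln in enumerate(lines):
--         if heading_substring in ln:
--             start_idx = i
--             break
--     if start_idx is None:
--         return None, ''
--
--     post_lines = lines[start_idx + 1 :]
--     first_table_line = None
--     for j, ln in enumerate(post_lines):
--         if ln.strip().startswith('|') and '|' in ln.strip()[1:]:
--             first_table_line = start_idx + 1 + j
--             break
--         if ln.strip().startswith('#') and j > 0:
--             break
--
--     if first_table_line is None:
--         return None, '\n'.join(post_lines)
--
--     table_lines = []
--     k = first_table_line
--     while k < len(lines):
--         ln = lines[k]
--         if ln.strip().startswith('|'):
--             table_lines.append(ln)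
--             k += 1
--             continue
--         break
--
--     remaining = '\n'.join(lines[k:])
--     parsed = parse_markdown_table(table_lines)
--     return (parsed if parsed else None), remaining
-- ===== SOURCE B (Python) =====
-- from typing import List, Optional, Tuple
--
-- def parse_markdown_table(table_lines: List[str]) -> List[List[str]]:
--     rows = []
--     for line in table_lines:
--         if not line.strip().startswith('|'): continue
--         parts = [c.strip() for c in line.strip().strip('|').split('|')]
--         if len(parts) <= 1: continue
--         rows.append(parts)
--     return rows
--
-- def find_table_after_heading(text: str, heading_substring: str) -> Tuple[Optional[List[List[str]]], str]:
--     # Single forward pass: a state machine over enumerate(lines).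
--     lines = text.splitlines()
--     state = 'find_heading'
--     head_idx = 0
--     seen = 0          # post-heading lines examined while looking for the table
--     table = []
--     stop = None       # index where 'remaining' starts once collecting ends
--     for i, ln in enumerate(lines):
--         s = ln.strip()
--         if state == 'find_heading':
--             if heading_substring in ln:
--                 state = 'find_table'
--                 head_idx = i
--         elif state == 'find_table':
--             if s.startswith('|') and '|' in s[1:]:
--                 state = 'collecting'
--                 table.append(ln)
--             elif s.startswith('#') and seen > 0:
--                 state = 'aborted'
--                 break
--             else:
--                 seen += 1
--         else:  # collecting
--             if s.startswith('|'):
--                 table.append(ln)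
--             else:
--                 stop = i
--                 break
--     if state == 'find_heading':
--         return None, ''
--     if state != 'collecting':
--         return None, '\n'.join(lines[head_idx + 1:])
--     remaining = '' if stop is None else '\n'.join(lines[stop:])
--     parsed = parse_markdown_table(table)
--     return (parsed if parsed else None), remaining
-- ===== Notes on version B (the rewrite author's own statement) =====
-- stated objective: alternative
-- what changed: A's three separate scans (heading search, table search with its j>0 '#'-break, and a while-collect over absolute indices) are replaced by ONE forward pass: an explicit state machine ('find_heading' / 'find_table' / 'collecting' / 'aborted') over enumerate(lines) that accumulates the table lines and the stop index as it goes; parse_markdown_table is reused unchanged.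
import Mathlib
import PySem

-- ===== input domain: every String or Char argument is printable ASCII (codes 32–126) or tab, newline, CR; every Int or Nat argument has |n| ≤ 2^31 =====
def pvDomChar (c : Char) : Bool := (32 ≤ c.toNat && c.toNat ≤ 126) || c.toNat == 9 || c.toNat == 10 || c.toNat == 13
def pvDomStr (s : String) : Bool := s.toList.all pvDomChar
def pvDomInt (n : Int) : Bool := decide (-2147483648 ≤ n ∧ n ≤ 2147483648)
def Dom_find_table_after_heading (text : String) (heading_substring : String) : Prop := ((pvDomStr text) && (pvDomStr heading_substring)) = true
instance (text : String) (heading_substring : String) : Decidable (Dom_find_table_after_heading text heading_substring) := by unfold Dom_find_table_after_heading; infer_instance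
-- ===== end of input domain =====

-- B replaces A's three staged scans (heading search, table search, while-collect, each with
-- its own index bookkeeping) by ONE forward pass: a state machine over the lines;
-- objective: alternative decomposition, same cost.

-- Shared line predicates (each is the transliteration of the identical Python expression
-- appearing in both Source A and Source B; Python s[1:] on a string is exactly List.drop 1 on chars):
-- heading_substring in ln
def pvHeadIn (h ln : String) : Bool := PySem.Str.isIn h ln
-- ln.strip().startswith('|')
def pvPipeLine (ln : String) : Bool := PySem.Chars.startswith (PySem.Chars.strip ln.toList) ['|']
-- ln.strip().startswith('|') and '|' in ln.strip()[1:]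
def pvTableStart (ln : String) : Bool :=
  let s := PySem.Chars.strip ln.toList
  PySem.Chars.startswith s ['|'] && PySem.Chars.isIn ['|'] (s.drop 1)
-- ln.strip().startswith('#')
def pvHashLine (ln : String) : Bool := PySem.Chars.startswith (PySem.Chars.strip ln.toList) ['#']

-- parse_markdown_table (identical code in Source A and Source B): per-line row extraction
def pvParseRow (line : String) : Option (List String) :=
  if ¬ pvPipeLine line then none
  else
    let parts := (PySem.Chars.splitOn (PySem.Chars.stripChars (PySem.Chars.strip line.toList) ['|']) ['|']).map
      (fun c => String.ofList (PySem.Chars.strip c))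
    if parts.length ≤ 1 then none else some parts

-- ===== PORT A =====
-- A's parse_markdown_table loop: 'rows.append(parts)' with two 'continue' guards
def pvParseA (table_lines : List String) : List (List String) :=
  table_lines.foldl (fun rows line =>
    match pvParseRow line with
    | none => rows
    | some parts => rows ++ [parts]) []

-- A's first loop: 'for i, ln in enumerate(lines): if heading_substring in ln: start_idx = i; break'
def pvFindHeadingA (heading : String) : List String → Nat → Option Nat
  | [], _ => none
  | ln :: rest, i => if pvHeadIn heading ln then some i else pvFindHeadingA heading rest (i + 1)

-- A's second loop over post_lines: table-start test first, then the 'j > 0' '#'-break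
def pvFindTableA : List String → Nat → Option Nat
  | [], _ => none
  | ln :: rest, j =>
    if pvTableStart ln then some j
    else if pvHashLine ln && decide (j > 0) then none
    else pvFindTableA rest (j + 1)

-- A's while loop: collect consecutive '|'-lines, return (table_lines, lines[k:])
def pvCollectA : List String → List String × List String
  | [] => ([], [])
  | ln :: rest =>
    if pvPipeLine ln then
      let (t, r) := pvCollectA rest
      (ln :: t, r)
    else ([], ln :: rest)

def find_table_after_heading (text : String) (heading_substring : String) : Option (List (List String)) × String :=
  let lines := PySem.Str.splitlines text
  match pvFindHeadingA heading_substring lines 0 with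
  | none => (none, "")
  | some start_idx =>
    -- lines[start_idx + 1:] with a nonnegative index is exactly List.drop
    let post_lines := lines.drop (start_idx + 1)
    match pvFindTableA post_lines 0 with
    | none => (none, PySem.Str.join "\n" post_lines)
    | some j =>
      -- the while loop walks lines from first_table_line = start_idx + 1 + j, i.e. post_lines.drop j
      let (table_lines, rest) := pvCollectA (post_lines.drop j)
      let remaining := PySem.Str.join "\n" rest
      let parsed := pvParseA table_lines
      (if parsed.isEmpty then none else some parsed, remaining)

-- ===== PORT B =====
-- Source B's parse_markdown_table (same code), written as the filterMap of the per-line extractor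
def pvParseB (table_lines : List String) : List (List String) :=
  table_lines.filterMap pvParseRow

-- Source B's single 'for i, ln in enumerate(lines)' state-machine loop.
-- States encoded as Nat: 0 = find_heading, 1 = find_table, 2 = collecting, 3 = aborted.
-- Returns the loop's final variables (state, head_idx, table, stop); 'break' = direct return.
def pvLoopB (h : String) : List String → Nat → Nat → Nat → Nat → List String →
    Nat × Nat × List String × Option Nat
  | [], _, state, hidx, _, table => (state, hidx, table, none)
  | ln :: rest, i, state, hidx, seen, table =>
    if state = 0 then
      if pvHeadIn h ln then pvLoopB h rest (i + 1) 1 i seen table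
      else pvLoopB h rest (i + 1) 0 hidx seen table
    else if state = 1 then
      if pvTableStart ln then pvLoopB h rest (i + 1) 2 hidx seen (table ++ [ln])
      else if pvHashLine ln && decide (seen > 0) then (3, hidx, table, none)   -- break (aborted)
      else pvLoopB h rest (i + 1) 1 hidx (seen + 1) table
    else
      if pvPipeLine ln then pvLoopB h rest (i + 1) 2 hidx seen (table ++ [ln])
      else (2, hidx, table, some i)                                            -- break (stop = i)

def find_table_after_heading_alt (text : String) (heading_substring : String) : Option (List (List String)) × String :=
  let lines := PySem.Str.splitlines text
  let (state, head_idx, table, stop) := pvLoopB heading_substring lines 0 0 0 0 []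
  if state = 0 then (none, "")
  else if state ≠ 2 then (none, PySem.Str.join "\n" (lines.drop (head_idx + 1)))
  else
    let remaining := match stop with
      | none => ""
      | some k => PySem.Str.join "\n" (lines.drop k)
    let parsed := pvParseB table
    (if parsed.isEmpty then none else some parsed, remaining)

-- ===== PRECONDITION & SPEC =====
def Spec_find_table_after_heading (text : String) (heading_substring : String) (out : Option (List (List String)) × String) : Prop := out = find_table_after_heading_alt text heading_substring
instance (text : String) (heading_substring : String) (out : Option (List (List String)) × String) : Decidable (Spec_find_table_after_heading text heading_substring out) := by unfold Spec_find_table_after_heading; infer_instance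

-- ===== CLAIM (what is proved, stated in full; the proofs are below) =====
def Claim_equal_find_table_after_heading : Prop := ∀ (text : String) (heading_substring : String), Dom_find_table_after_heading text heading_substring → Spec_find_table_after_heading text heading_substring (find_table_after_heading text heading_substring)

-- ===== LEMMAS AND PROOFS =====

theorem pvFindHeadingA_eq (h : String) (l : List String) (i : Nat) :
    pvFindHeadingA h l i = (l.findIdx? (pvHeadIn h)).map (· + i) := by
  induction l generalizing i with
  | nil => simp [pvFindHeadingA]
  | cons ln rest ih =>
    rw [pvFindHeadingA, List.findIdx?_cons]
    by_cases hc : pvHeadIn h ln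
    · simp [hc]
    · simp only [hc, Bool.false_eq_true, if_false, ih (i + 1), Option.map_map]
      cases rest.findIdx? (pvHeadIn h) <;> simp
      omega

-- number of leading '|'-lines (used only in the proofs to describe both loops' effect)
def pvCountPrefix : List String → Nat
  | [] => 0
  | ln :: rest => if pvPipeLine ln then pvCountPrefix rest + 1 else 0

theorem pvCollectA_eq (l : List String) :
    pvCollectA l = (l.take (pvCountPrefix l), l.drop (pvCountPrefix l)) := by
  induction l with
  | nil => simp [pvCollectA, pvCountPrefix]
  | cons ln rest ih =>
    simp only [pvCollectA, pvCountPrefix]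
    by_cases hc : pvPipeLine ln
    · simp [hc, ih]
    · simp [hc]

theorem pvParseA_eq (acc : List (List String)) (l : List String) :
    l.foldl (fun rows line =>
      match pvParseRow line with
      | none => rows
      | some parts => rows ++ [parts]) acc = acc ++ l.filterMap pvParseRow := by
  induction l generalizing acc with
  | nil => simp
  | cons ln rest ih =>
    simp only [List.foldl_cons, List.filterMap_cons]
    cases pvParseRow ln <;> simp [ih]

-- B's state-0 phase reaches the heading exactly where A's first loop finds it
theorem pvLoopB_state0 (h : String) (l : List String) (i : Nat) :
    pvLoopB h l i 0 0 0 [] =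
      match l.findIdx? (pvHeadIn h) with
      | none => (0, 0, [], none)
      | some k => pvLoopB h (l.drop (k + 1)) (i + k + 1) 1 (i + k) 0 [] := by
  induction l generalizing i with
  | nil => simp [pvLoopB]
  | cons ln rest ih =>
    rw [pvLoopB, List.findIdx?_cons]
    by_cases hc : pvHeadIn h ln
    · simp [hc]
    · simp only [hc, Bool.false_eq_true, if_false]
      rw [ih (i + 1)]
      cases hfi : rest.findIdx? (pvHeadIn h) with
      | none => simp
      | some k =>
        simp only [Option.map_some, List.drop_succ_cons]
        have h1 : i + 1 + k = i + (k + 1) := by omega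
        rw [h1]
        simp

theorem pvFindTableA_ge (l : List String) (j m : Nat) (hm : pvFindTableA l j = some m) : j ≤ m := by
  induction l generalizing j with
  | nil => simp [pvFindTableA] at hm
  | cons ln rest ih =>
    rw [pvFindTableA] at hm
    by_cases hT : pvTableStart ln
    · simp [hT] at hm; omega
    · by_cases hH : pvHashLine ln && decide (j > 0)
      · simp [hT, hH] at hm
      · simp only [hT, Bool.false_eq_true, if_false, hH, if_false] at hm
        have := ih (j + 1) hm
        omega

-- B's state-1 phase, when A's second loop fails: B ends in state 1 or 3, untouched table, no stop
theorem pvLoopB_state1_none (h : String) (l : List String) (i seen hidx : Nat) (table : List String)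
    (hn : pvFindTableA l seen = none) :
    ∃ st, (st = 1 ∨ st = 3) ∧ pvLoopB h l i 1 hidx seen table = (st, hidx, table, none) := by
  induction l generalizing i seen with
  | nil => exact ⟨1, Or.inl rfl, by simp [pvLoopB]⟩
  | cons ln rest ih =>
    rw [pvFindTableA] at hn
    rw [pvLoopB]
    by_cases hT : pvTableStart ln
    · simp [hT] at hn
    · by_cases hH : pvHashLine ln && decide (seen > 0)
      · exact ⟨3, Or.inr rfl, by simp [hT, hH]⟩
      · simp only [hT, Bool.false_eq_true, if_false, hH, if_false] at hn ⊢
        simpa using ih (i + 1) (seen + 1) hn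

-- B's state-1 phase, when A's second loop finds the table at offset m - seen
theorem pvLoopB_state1_some (h : String) (l : List String) (i seen hidx m : Nat) (table : List String)
    (hm : pvFindTableA l seen = some m) :
    pvLoopB h l i 1 hidx seen table =
      pvLoopB h (l.drop (m - seen + 1)) (i + (m - seen) + 1) 2 hidx (seen + (m - seen))
        (table ++ (l.drop (m - seen)).take 1) := by
  induction l generalizing i seen table with
  | nil => simp [pvFindTableA] at hm
  | cons ln rest ih =>
    rw [pvFindTableA] at hm
    rw [pvLoopB]
    by_cases hT : pvTableStart ln
    · simp only [hT, if_pos trivial] at hm ⊢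
      obtain rfl : seen = m := by simpa using hm
      simp
    · by_cases hH : pvHashLine ln && decide (seen > 0)
      · simp [hT, hH] at hm
      · simp only [hT, Bool.false_eq_true, if_false, hH] at hm ⊢
        have hge := pvFindTableA_ge rest (seen + 1) m hm
        rw [ih (i + 1) (seen + 1) table hm]
        have e1 : m - seen = (m - (seen + 1)) + 1 := by omega
        rw [e1]
        simp only [List.drop_succ_cons]
        have e2 : i + 1 + (m - (seen + 1)) = i + (m - (seen + 1) + 1) := by omega
        have e4 : seen + 1 + (m - (seen + 1)) = seen + (m - (seen + 1) + 1) := by omega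
        rw [e2, e4]
        simp

-- B's collecting phase: appends the maximal '|'-prefix, stop = first non-'|' index (none at EOF)
theorem pvLoopB_state2 (h : String) (l : List String) (i seen hidx : Nat) (table : List String) :
    pvLoopB h l i 2 hidx seen table =
      (2, hidx, table ++ l.take (pvCountPrefix l),
        if pvCountPrefix l = l.length then none else some (i + pvCountPrefix l)) := by
  induction l generalizing i table with
  | nil => simp [pvLoopB, pvCountPrefix]
  | cons ln rest ih =>
    rw [pvLoopB]
    by_cases hc : pvPipeLine ln
    · simp only [pvCountPrefix, hc, if_pos trivial, reduceIte, reduceCtorEq]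
      rw [ih (i + 1) (table ++ [ln])]
      simp only [List.take_succ_cons, List.length_cons, List.append_assoc, List.singleton_append]
      have e : pvCountPrefix rest + 1 = rest.length + 1 ↔ pvCountPrefix rest = rest.length := by omega
      by_cases hlen : pvCountPrefix rest = rest.length
      · simp [hlen]
      · rw [if_neg hlen, if_neg (e.not.mpr hlen)]
        have ee : i + (pvCountPrefix rest + 1) = i + 1 + pvCountPrefix rest := by omega
        rw [ee]
        simp
    · simp [pvCountPrefix, hc]

-- a table-start line is in particular a '|'-line
theorem pvTableStart_pipe (ln : String) (h : pvTableStart ln = true) : pvPipeLine ln = true := by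
  unfold pvTableStart at h
  unfold pvPipeLine
  exact (Bool.and_eq_true_iff.mp h).1

-- the table line A's second loop found really is there and is a table start
theorem pvFindTableA_drop (l : List String) (j m : Nat) (hm : pvFindTableA l j = some m) :
    ∃ ln rest, l.drop (m - j) = ln :: rest ∧ pvTableStart ln = true := by
  induction l generalizing j with
  | nil => simp [pvFindTableA] at hm
  | cons ln rest ih =>
    rw [pvFindTableA] at hm
    by_cases hT : pvTableStart ln
    · simp only [hT, if_pos trivial] at hm
      obtain rfl : j = m := by simpa using hm
      exact ⟨ln, rest, by simp, hT⟩
    · by_cases hH : pvHashLine ln && decide (j > 0)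
      · simp [hT, hH] at hm
      · simp only [hT, Bool.false_eq_true, if_false, hH] at hm
        have hge := pvFindTableA_ge rest (j + 1) m hm
        obtain ⟨ln', rest', heq, hts⟩ := ih (j + 1) hm
        refine ⟨ln', rest', ?_, hts⟩
        have e : m - j = (m - (j + 1)) + 1 := by omega
        rw [e, List.drop_succ_cons]
        exact heq

theorem find_table_after_heading_eq (text heading_substring : String) :
    find_table_after_heading text heading_substring = find_table_after_heading_alt text heading_substring := by
  simp only [find_table_after_heading, find_table_after_heading_alt]
  rw [pvFindHeadingA_eq, pvLoopB_state0]
  cases hfi : (PySem.Str.splitlines text).findIdx? (pvHeadIn heading_substring) with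
  | none => simp
  | some idx =>
    simp only [Option.map_some, Nat.zero_add, Nat.add_zero]
    cases hft : pvFindTableA ((PySem.Str.splitlines text).drop (idx + 1)) 0 with
    | none =>
      obtain ⟨st, hst, heq⟩ := pvLoopB_state1_none heading_substring _ (idx + 1) 0 idx [] hft
      rw [heq]
      rcases hst with rfl | rfl <;> simp
    | some m =>
      obtain ⟨ln, rest, hdrop, hts⟩ := pvFindTableA_drop _ 0 m hft
      rw [Nat.sub_zero] at hdrop
      have hpipe := pvTableStart_pipe ln hts
      rw [pvLoopB_state1_some heading_substring _ (idx + 1) 0 idx m [] hft]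
      simp only [Nat.sub_zero, Nat.zero_add]
      have hrest : ((PySem.Str.splitlines text).drop (idx + 1)).drop (m + 1) = rest := by
        have h1 := congrArg (List.drop 1) hdrop
        rw [List.drop_drop] at h1
        simpa [Nat.add_comm] using h1
      rw [hrest, hdrop, pvLoopB_state2]
      simp only [List.nil_append]
      rw [pvCollectA_eq]
      simp only [pvCountPrefix, hpipe, if_pos trivial, List.take_succ_cons, List.drop_succ_cons]
      by_cases hlen : pvCountPrefix rest = rest.length
      · rw [if_pos hlen]
        have hre : rest.drop (pvCountPrefix rest) = [] := by
          rw [hlen, List.drop_length]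
        rw [hre]
        simp only [pvParseA, pvParseA_eq, pvParseB, List.nil_append, List.filterMap_cons,
          List.take_zero, List.singleton_append]
        cases pvParseRow ln <;> simp [PySem.Str.join]
      · rw [if_neg hlen]
        have hdd : (PySem.Str.splitlines text).drop (idx + 1 + m + 1 + pvCountPrefix rest)
            = rest.drop (pvCountPrefix rest) := by
          rw [← hrest, List.drop_drop, List.drop_drop]
          congr 1
        simp only [hdd]
        simp only [pvParseA, pvParseA_eq, pvParseB, List.nil_append, List.filterMap_cons,
          List.take_zero, List.singleton_append]
        cases pvParseRow ln <;> simp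

-- ===== VERDICT (by name: the statement is the Claim_ definition above) =====
theorem find_table_after_heading_spec : Claim_equal_find_table_after_heading := by
  intro text heading _
  exact find_table_after_heading_eq text heading
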